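-- pv_equiv track=rewrite | github.com/gogagubi/Codility-Python | Lesson_15_caterpillar_method/Lesson_15_CountDistinctSlices.py | solution
-- ===== SOURCE A (Python) =====
-- def solution(M, A):
--     N = len(A)
--     ans = 0
--     P = 0
--     Q = 0
--     seen = [False] * (M + 1)
--     limit = 1000000000
--
--     while Q < N:
--         if seen[A[Q]] is not True:
--             ans += (Q - P + 1)
--             if ans >= limit:
--                 return limit
--
--             seen[A[Q]] = True
--             Q += 1
--         else:
--             seen[A[P]] = False
--             P += 1
--
--     return ans
-- ===== SOURCE B (Python) =====
-- def solution(M, A):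
--     N = len(A)
--     limit = 1000000000
--     last = [-1] * (M + 1)
--     ans = 0
--     left = 0
--     for right in range(N):
--         v = A[right]
--         if last[v] >= left:
--             left = last[v] + 1
--         last[v] = right
--         ans += right - left + 1
--         if ans >= limit:
--             return limit
--     return ans
-- ===== Notes on version B (the rewrite author's own statement) =====
-- stated objective: simpler
-- what changed: Replaces the caterpillar while-loop (which steps the left pointer one cell at a time, marking and un-marking a boolean seen array) by a single for-loop over right endpoints that jumps the left boundary directly using a last-occurrence index array, with no un-marking phase.
import Mathlib
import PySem

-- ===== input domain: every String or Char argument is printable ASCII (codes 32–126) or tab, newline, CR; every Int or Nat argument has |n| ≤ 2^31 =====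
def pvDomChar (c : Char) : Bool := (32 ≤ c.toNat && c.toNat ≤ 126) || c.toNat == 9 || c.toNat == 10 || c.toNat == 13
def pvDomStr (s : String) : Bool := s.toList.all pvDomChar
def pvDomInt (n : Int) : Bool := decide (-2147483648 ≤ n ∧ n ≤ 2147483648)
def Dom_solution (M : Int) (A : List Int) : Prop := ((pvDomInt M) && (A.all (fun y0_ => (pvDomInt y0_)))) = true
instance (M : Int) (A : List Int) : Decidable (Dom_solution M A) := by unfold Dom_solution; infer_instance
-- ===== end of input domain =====

-- B replaces A's caterpillar while-loop (step the left pointer one cell at a time, setting and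
-- unsetting a boolean 'seen' array) by a single for-loop over right endpoints that jumps the left
-- boundary directly using a last-occurrence index array; objective: simpler (no un-marking phase,
-- one loop with one update per element).

-- ===== PORT A =====
-- while-loop of A as fuel recursion: each iteration advances Q (push) or P (pop);
-- 2*len+1 fuel covers every run on which the Python loop terminates normally (P,Q ≤ len).
def solutionLoop (A : List Int) (fuel : Nat) (seen : List Bool) (ans P Q : Int) : Int :=
  match fuel with
  | 0 => ans
  | fuel + 1 =>
    if Q < PySem.List.len A then
      if PySem.List.pyGetD seen (PySem.List.pyGetD A Q 0) false ≠ true then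
        let ans' := ans + (Q - P + 1)
        if 1000000000 ≤ ans' then 1000000000
        else
          solutionLoop A fuel (PySem.List.pySetD seen (PySem.List.pyGetD A Q 0) true) ans' P (Q + 1)
      else
        solutionLoop A fuel (PySem.List.pySetD seen (PySem.List.pyGetD A P 0) false) ans (P + 1) Q
    else ans

def solution (M : Int) (A : List Int) : Int :=
  -- seen = [False] * (M + 1)   ([x]*k is empty for k ≤ 0)
  solutionLoop A (2 * A.length + 1) (List.replicate (M + 1).toNat false) 0 0 0

-- ===== PORT B =====
-- for right in range(N): jump left via the last-occurrence array, add right-left+1, cap at 1e9.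
def solutionAltLoop (A : List Int) (rs : List Int) (last : List Int) (ans left : Int) : Int :=
  match rs with
  | [] => ans
  | r :: rs' =>
    let v := PySem.List.pyGetD A r 0
    let lv := PySem.List.pyGetD last v 0
    let left' := if left ≤ lv then lv + 1 else left
    let last' := PySem.List.pySetD last v r
    let ans' := ans + (r - left' + 1)
    if 1000000000 ≤ ans' then 1000000000
    else solutionAltLoop A rs' last' ans' left'

def solution_alt (M : Int) (A : List Int) : Int :=
  solutionAltLoop A (PySem.List.pyRange 0 (PySem.List.len A) 1)
    (List.replicate (M + 1).toNat (-1)) 0 0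

-- ===== PRECONDITION & SPEC =====
-- Pre_ admits exactly the elements Python can index with: on any element outside
-- [-(M+1), M] (in particular any element when M < -1 and A ≠ []) both programs raise IndexError.
def Pre_solution (M : Int) (A : List Int) : Prop := ∀ x ∈ A, -(M + 1) ≤ x ∧ x ≤ M
instance (M : Int) (A : List Int) : Decidable (Pre_solution M A) := by
  unfold Pre_solution; infer_instance

def pvWitness_solution : Int × List Int := (3, [0, 1, 2, 1, 3])

def Spec_solution (M : Int) (A : List Int) (out : Int) : Prop := out = solution_alt M A
instance (M : Int) (A : List Int) (out : Int) : Decidable (Spec_solution M A out) := by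
  unfold Spec_solution; infer_instance

-- ===== CLAIM (what is proved, stated in full; the proofs are below) =====
def Claim_equal_solution : Prop :=
  ∀ (M : Int) (A : List Int), Dom_solution M A → Pre_solution M A →
    Spec_solution M A (solution M A)

-- ===== LEMMAS AND PROOFS =====

-- Python's effective index for index v into a list of length m (valid when -m ≤ v < m).
def effIdx (m : Nat) (v : Int) : Nat := (if v < 0 then v + m else v).toNat

-- effective value of A at Nat position i, aliased into [0, m)
def aIdx (A : List Int) (m : Nat) (i : Nat) : Nat := effIdx m (A.getD i 0)

lemma effIdx_lt (m : Nat) (v : Int) (h1 : -(m : Int) ≤ v) (h2 : v < (m : Int)) :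
    effIdx m v < m := by
  unfold effIdx; split <;> omega

lemma pyGetD_eff {α : Type} (xs : List α) (v : Int) (d : α)
    (h1 : -(xs.length : Int) ≤ v) (h2 : v < (xs.length : Int)) :
    PySem.List.pyGetD xs v d = xs.getD (effIdx xs.length v) d := by
  simp only [PySem.List.pyGetD, PySem.List.pyGet?, PySem.List.pyIdx?, effIdx]
  split_ifs with h h' <;> try omega
  · simp [List.getD]
  · have : xs.length - (-v).toNat = (v + xs.length).toNat := by omega
    simp [List.getD, this]

lemma pySetD_eff {α : Type} (xs : List α) (v : Int) (b : α)
    (h1 : -(xs.length : Int) ≤ v) (h2 : v < (xs.length : Int)) :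
    PySem.List.pySetD xs v b = xs.set (effIdx xs.length v) b := by
  simp only [PySem.List.pySetD, PySem.List.pySet?, PySem.List.pyIdx?, effIdx]
  split_ifs with h h' <;> try omega
  · simp
  · have : xs.length - (-v).toNat = (v + xs.length).toNat := by omega
    simp [this]

lemma getD_set_eq {α : Type} (xs : List α) (k : Nat) (b d : α) (hk : k < xs.length) :
    (xs.set k b).getD k d = b := by
  simp [List.getD, hk]

lemma getD_set_ne {α : Type} (xs : List α) (k w : Nat) (b d : α) (h : w ≠ k) :
    (xs.set k b).getD w d = xs.getD w d := by
  simp [List.getD, Ne.symm h]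

lemma getD_replicate' {α : Type} (m w : Nat) (c d : α) (h : w < m) :
    (List.replicate m c).getD w d = c := by
  simp [List.getD, h]

-- the main simulation lemma: A's caterpillar loop equals B's per-right-endpoint loop.
-- Invariants: seen marks exactly the values of the window A[P:Q]; the window is duplicate-free;
-- last[w] is the last occurrence of value w in A[0:Q] (or -1); L is B's left pointer, which
-- trails A's P only while A is still popping (then last[A[Q]] ≥ P-1).
lemma loop_eq (A : List Int) :
    ∀ (fuel : Nat) (seen : List Bool) (last : List Int) (P Q L : Nat) (ans : Int),
    last.length = seen.length →
    Q ≤ A.length → P ≤ Q → L ≤ P →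
    (∀ i, i < A.length → -(seen.length : Int) ≤ A.getD i 0 ∧ A.getD i 0 < (seen.length : Int)) →
    (∀ w, w < seen.length →
      (seen.getD w false = true ↔ ∃ i, P ≤ i ∧ i < Q ∧ aIdx A seen.length i = w)) →
    (∀ i j, P ≤ i → i < j → j < Q → aIdx A seen.length i ≠ aIdx A seen.length j) →
    (∀ w, w < seen.length →
      (last.getD w 0 = -1 ∧ ∀ i, i < Q → aIdx A seen.length i ≠ w) ∨
      (∃ j, j < Q ∧ last.getD w 0 = (j : Int) ∧ aIdx A seen.length j = w ∧
        ∀ i, j < i → i < Q → aIdx A seen.length i ≠ w)) →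
    (L < P → (P : Int) - 1 ≤ last.getD (aIdx A seen.length Q) 0) →
    (A.length - Q) + (A.length - P) < fuel →
    solutionLoop A fuel seen ans P Q =
      solutionAltLoop A (PySem.List.pyRange Q A.length 1) last ans L := by
  intro fuel
  induction fuel with
  | zero =>
    intro seen last P Q L ans _ hQ hPQ hLP _ _ _ _ _ hfuel
    omega
  | succ fuel ih =>
    intro seen last P Q L ans hm hQ hPQ hLP hA hseen hdist hlast hC hfuel
    by_cases hQn : Q < A.length
    · have hvQ := hA Q hQn
      have hwlt : aIdx A seen.length Q < seen.length := effIdx_lt _ _ hvQ.1 hvQ.2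
      have hgs : PySem.List.pyGetD seen (A.getD Q 0) false
          = seen.getD (aIdx A seen.length Q) false :=
        pyGetD_eff seen _ false hvQ.1 hvQ.2
      simp only [solutionLoop, PySem.List.len_eq, PySem.List.pyGetD_natCast]
      rw [if_pos (show (Q : Int) < (A.length : Int) by exact_mod_cast hQn)]
      rw [hgs]
      by_cases hb : seen.getD (aIdx A seen.length Q) false = true
      · -- POP step: A unmarks A[P] and advances P; B is idle on the same right endpoint
        rw [if_neg (not_not_intro hb)]
        obtain ⟨i, hPi, hiQ, hai⟩ := (hseen _ hwlt).1 hb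
        have hPQ' : P < Q := lt_of_le_of_lt hPi hiQ
        have hvP := hA P (by omega)
        have haPlt : aIdx A seen.length P < seen.length := effIdx_lt _ _ hvP.1 hvP.2
        have hj : ∃ j, j < Q ∧ last.getD (aIdx A seen.length Q) 0 = (j : Int) ∧
            aIdx A seen.length j = aIdx A seen.length Q ∧
            ∀ i', j < i' → i' < Q → aIdx A seen.length i' ≠ aIdx A seen.length Q := by
          rcases hlast _ hwlt with ⟨_, hnone⟩ | h2
          · exact absurd hai (hnone i hiQ)
          · exact h2
        obtain ⟨j, hjQ, hlv, haj, hmax⟩ := hj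
        have hPj : P ≤ j := by
          by_contra hc
          rcases lt_or_ge j i with hji | hij
          · exact hmax i hji hiQ hai
          · omega
        rw [pySetD_eff seen _ false hvP.1 hvP.2]
        rw [show ((P : Int) + 1) = ((P + 1 : Nat) : Int) by push_cast; ring]
        refine ih (seen.set (aIdx A seen.length P) false) last (P + 1) Q L ans
          ?_ ?_ ?_ ?_ ?_ ?_ ?_ ?_ ?_ ?_
        · simp [hm]
        · exact hQ
        · omega
        · omega
        · simpa using hA
        · simp only [List.length_set]
          intro w' hw'
          by_cases hww : w' = aIdx A seen.length P
          · subst hww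
            rw [getD_set_eq _ _ _ _ haPlt]
            constructor
            · intro h; cases h
            · rintro ⟨i', h1, h2, h3⟩
              exact absurd h3.symm (hdist P i' le_rfl (by omega) h2)
          · rw [getD_set_ne _ _ _ _ _ hww, hseen w' hw']
            constructor
            · rintro ⟨i', h1, h2, h3⟩
              refine ⟨i', ?_, h2, h3⟩
              rcases Nat.eq_or_lt_of_le h1 with h | h
              · exact absurd h3 (by rw [h] at hww; exact fun hh => hww hh.symm)
              · omega
            · rintro ⟨i', h1, h2, h3⟩
              exact ⟨i', by omega, h2, h3⟩
        · simp only [List.length_set]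
          intro i' j' h1 h2 h3
          exact hdist i' j' (by omega) h2 h3
        · simp only [List.length_set]
          exact hlast
        · simp only [List.length_set]
          intro _
          rw [hlv]
          push_cast
          omega
        · omega
      · -- PUSH step: A marks A[Q] and advances Q; B consumes right endpoint Q, jumping left to P
        rw [if_pos hb]
        rw [PySem.List.pyRange_one_cons (show (Q : Int) < (A.length : Int) by exact_mod_cast hQn)]
        simp only [solutionAltLoop, PySem.List.pyGetD_natCast]
        have hgl : PySem.List.pyGetD last (A.getD Q 0) 0
            = last.getD (aIdx A seen.length Q) 0 := by
          have h := pyGetD_eff last (A.getD Q 0) 0 (by rw [hm]; exact hvQ.1) (by rw [hm]; exact hvQ.2)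
          rw [h]; unfold aIdx; rw [hm]
        have hsl : PySem.List.pySetD last (A.getD Q 0) (Q : Int)
            = last.set (aIdx A seen.length Q) (Q : Int) := by
          have h := pySetD_eff last (A.getD Q 0) (Q : Int) (by rw [hm]; exact hvQ.1) (by rw [hm]; exact hvQ.2)
          rw [h]; unfold aIdx; rw [hm]
        rw [hgl, hsl]
        have hleft : (if (L : Int) ≤ last.getD (aIdx A seen.length Q) 0
            then last.getD (aIdx A seen.length Q) 0 + 1 else (L : Int)) = (P : Int) := by
          rcases hlast _ hwlt with ⟨hlv, _⟩ | ⟨j, hjQ, hlv, haj, _⟩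
          · rw [hlv, if_neg (by omega)]
            by_cases hLP' : L < P
            · have h1 := hC hLP'; rw [hlv] at h1; omega
            · omega
          · have hjP : j < P := by
              by_contra hc
              exact hb ((hseen _ hwlt).2 ⟨j, Nat.le_of_not_lt hc, hjQ, haj⟩)
            rw [hlv]
            by_cases hLP' : L < P
            · have h1 := hC hLP'; rw [hlv] at h1
              rw [if_pos (by omega)]
              omega
            · rw [if_neg (by omega)]
              omega
        rw [hleft]
        rw [pySetD_eff seen _ true hvQ.1 hvQ.2]
        by_cases hcap : (1000000000 : Int) ≤ ans + ((Q : Int) - (P : Int) + 1)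
        · rw [if_pos hcap, if_pos hcap]
        · rw [if_neg hcap, if_neg hcap]
          rw [show ((Q : Int) + 1) = ((Q + 1 : Nat) : Int) by push_cast; ring]
          refine ih (seen.set (aIdx A seen.length Q) true) (last.set (aIdx A seen.length Q) (Q : Int))
            P (Q + 1) P (ans + ((Q : Int) - (P : Int) + 1)) ?_ ?_ ?_ ?_ ?_ ?_ ?_ ?_ ?_ ?_
          · simp [hm]
          · omega
          · omega
          · omega
          · simpa using hA
          · simp only [List.length_set]
            intro w' hw'
            by_cases hww : w' = aIdx A seen.length Q
            · subst hww
              rw [getD_set_eq _ _ _ _ hwlt]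
              simp only [true_iff]
              exact ⟨Q, hPQ, by omega, rfl⟩
            · rw [getD_set_ne _ _ _ _ _ hww, hseen w' hw']
              constructor
              · rintro ⟨i', h1, h2, h3⟩
                exact ⟨i', h1, by omega, h3⟩
              · rintro ⟨i', h1, h2, h3⟩
                refine ⟨i', h1, ?_, h3⟩
                rcases Nat.lt_succ_iff_lt_or_eq.1 h2 with h | h
                · exact h
                · subst h; exact absurd h3.symm hww
          · simp only [List.length_set]
            intro i' j' h1 h2 h3 heq
            by_cases hj' : j' = Q
            · subst hj'
              exact hb ((hseen _ hwlt).2 ⟨i', h1, h2, heq⟩)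
            · exact hdist i' j' h1 h2 (by omega) heq
          · simp only [List.length_set]
            intro w' hw'
            by_cases hww : w' = aIdx A seen.length Q
            · subst hww
              right
              exact ⟨Q, by omega, getD_set_eq _ _ _ _ (by rw [hm]; exact hwlt), rfl,
                fun i' h1 h2 => by omega⟩
            · rw [getD_set_ne _ _ _ _ _ hww]
              rcases hlast w' hw' with ⟨h1, h2⟩ | ⟨j, hj1, hj2, hj3, hj4⟩
              · left
                refine ⟨h1, fun i' hi' => ?_⟩
                rcases Nat.lt_succ_iff_lt_or_eq.1 hi' with h | h
                · exact h2 i' h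
                · subst h; exact fun heq => absurd heq.symm hww
              · right
                refine ⟨j, by omega, hj2, hj3, fun i' h1' h2' => ?_⟩
                rcases Nat.lt_succ_iff_lt_or_eq.1 h2' with h | h
                · exact hj4 i' h1' h
                · subst h; exact fun heq => absurd heq.symm hww
          · intro h; exact absurd h (lt_irrefl P)
          · omega
    · simp only [solutionLoop, PySem.List.len_eq]
      rw [if_neg (show ¬((Q : Int) < (A.length : Int)) by exact_mod_cast hQn)]
      rw [PySem.List.pyRange_one_eq_nil (show (A.length : Int) ≤ (Q : Int) by exact_mod_cast Nat.le_of_not_lt hQn)]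
      rfl

-- ===== VERDICT (by name: the statement is the Claim_ definition above) =====
theorem solution_spec : Claim_equal_solution := by
  intro M A _hDom hPre
  unfold Spec_solution solution solution_alt
  rw [PySem.List.len_eq]
  have hMnn : ∀ i, i < A.length → -((M + 1).toNat : Int) ≤ A.getD i 0 ∧ A.getD i 0 < ((M + 1).toNat : Int) := by
    intro i hi
    have hx : A.getD i 0 ∈ A := by
      rw [List.getD_eq_getElem _ _ hi]
      exact List.getElem_mem hi
    have hb := hPre _ hx
    constructor <;> omega
  have h := loop_eq A (2 * A.length + 1) (List.replicate (M + 1).toNat false)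
      (List.replicate (M + 1).toNat (-1)) 0 0 0 0
      (by simp)
      (Nat.zero_le _) le_rfl le_rfl
      (by simpa using hMnn)
      (by
        simp only [List.length_replicate]
        intro w hw
        rw [getD_replicate' _ _ _ _ hw]
        constructor
        · intro h; cases h
        · rintro ⟨i, _, h2, _⟩; omega)
      (by intro i j _ _ h3; omega)
      (by
        simp only [List.length_replicate]
        intro w hw
        left
        exact ⟨getD_replicate' _ _ _ _ hw, fun i hi => absurd hi (Nat.not_lt_zero i)⟩)
      (by intro h; omega)
      (by omega)
  simpa using h
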